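-- pv_equiv track=rewrite | github.com/suchirsalhan/bliss | src/generate_artificial_errors.py | find_learner_edit
-- ===== SOURCE A (Python) =====
-- from typing import List, Dict, Tuple, Optional
--
-- def find_learner_edit(good: str, bad: str) -> Tuple[Optional[int], str, str, str]:
--     good_words = good.split()
--     bad_words = bad.split()
--
--     for i in range(min(len(good_words), len(bad_words))):
--         if good_words[i] != bad_words[i]:
--             return i, 'R', good_words[i], bad_words[i]
--
--     if len(good_words) > len(bad_words):
--         return len(bad_words), 'M', good_words[len(bad_words)], ''
--     elif len(bad_words) > len(good_words):
--         return len(good_words), 'U', '', bad_words[len(good_words)]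
--
--     return None, '', '', ''
-- ===== SOURCE B (Python) =====
-- def find_learner_edit(good, bad):
--     gs = good.split()
--     bs = bad.split()
--     gs.reverse()
--     bs.reverse()
--     i = 0
--     while gs or bs:
--         if not gs:
--             return i, 'U', '', bs[-1]
--         if not bs:
--             return i, 'M', gs[-1], ''
--         g = gs.pop()
--         b = bs.pop()
--         if g != b:
--             return i, 'R', g, b
--         i += 1
--     return None, '', '', ''
-- ===== Notes on version B (the rewrite author's own statement) =====
-- stated objective: alternative
-- what changed: Replaces A's index loop over range(min(len,len)) plus three post-loop length-comparison cases by a single padded walk that consumes both word lists in step and decides U/M/R/equal at each position, with no indexing and no length comparison.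
import Mathlib
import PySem

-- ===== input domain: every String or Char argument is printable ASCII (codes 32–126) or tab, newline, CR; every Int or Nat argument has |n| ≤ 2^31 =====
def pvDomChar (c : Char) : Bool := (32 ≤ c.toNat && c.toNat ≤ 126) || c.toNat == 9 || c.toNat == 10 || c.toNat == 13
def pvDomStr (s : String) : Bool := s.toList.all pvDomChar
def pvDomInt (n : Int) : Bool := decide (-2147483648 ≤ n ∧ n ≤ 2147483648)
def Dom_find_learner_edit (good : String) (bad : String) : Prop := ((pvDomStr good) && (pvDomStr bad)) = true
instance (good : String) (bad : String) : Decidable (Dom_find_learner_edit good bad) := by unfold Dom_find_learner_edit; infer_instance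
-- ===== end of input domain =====

-- B replaces A's index loop plus three post-loop length cases by one recursive padded walk over both word lists.

-- ===== PORT A =====
-- the 'for i in range(min(len(good_words), len(bad_words)))' loop with its early return:
-- some r = 'return r', none = loop fell through
def pvLoopA (gw bw : List String) (i : Nat) : Option (Option Int × String × String × String) :=
  if i < min gw.length bw.length then
    if gw.getD i "" ≠ bw.getD i "" then
      some (some (i : Int), "R", gw.getD i "", bw.getD i "")
    else pvLoopA gw bw (i + 1)
  else none
termination_by min gw.length bw.length - i

def find_learner_edit (good : String) (bad : String) : Option Int × String × String × String :=
  let good_words := PySem.Str.split₀ good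
  let bad_words := PySem.Str.split₀ bad
  match pvLoopA good_words bad_words 0 with
  | some r => r
  | none =>
    if good_words.length > bad_words.length then
      (some (bad_words.length : Int), "M", good_words.getD bad_words.length "", "")
    else if bad_words.length > good_words.length then
      (some (good_words.length : Int), "U", "", bad_words.getD good_words.length "")
    else (none, "", "", "")

-- ===== PORT B =====
def pvGoB (i : Int) : List String → List String → Option Int × String × String × String
  | [], [] => (none, "", "", "")
  | [], b :: _ => (some i, "U", "", b)
  | g :: _, [] => (some i, "M", g, "")
  | g :: gs, b :: bs =>
    if g ≠ b then (some i, "R", g, b) else pvGoB (i + 1) gs bs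

def find_learner_edit_alt (good : String) (bad : String) : Option Int × String × String × String :=
  pvGoB 0 (PySem.Str.split₀ good) (PySem.Str.split₀ bad)

-- ===== PRECONDITION & SPEC =====
def Spec_find_learner_edit (good : String) (bad : String) (out : Option Int × String × String × String) : Prop := out = find_learner_edit_alt good bad
instance (good : String) (bad : String) (out : Option Int × String × String × String) : Decidable (Spec_find_learner_edit good bad out) := by unfold Spec_find_learner_edit; infer_instance

-- ===== CLAIM (what is proved, stated in full; the proofs are below) =====
def Claim_equal_find_learner_edit : Prop := ∀ (good : String) (bad : String), Dom_find_learner_edit good bad → Spec_find_learner_edit good bad (find_learner_edit good bad)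

-- ===== LEMMAS AND PROOFS =====

def pvShift (r : Option Int × String × String × String) : Option Int × String × String × String :=
  match r with
  | (some j, t, x, y) => (some (j + 1), t, x, y)
  | o => o

lemma pvLoopA_cons (g b : String) (gs bs : List String) (i : Nat) :
    pvLoopA (g :: gs) (b :: bs) (i + 1) = (pvLoopA gs bs i).map pvShift := by
  fun_induction pvLoopA gs bs i with
  | case1 i hlt hne =>
    rw [pvLoopA]
    simp only [List.length_cons, List.getD_cons_succ]
    rw [if_pos (by omega), if_pos hne]
    simp [pvShift]
  | case2 i hlt heq ih =>
    rw [pvLoopA]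
    simp only [List.length_cons, List.getD_cons_succ]
    rw [if_pos (by omega), if_neg heq]
    exact ih
  | case3 i hge =>
    rw [pvLoopA]
    rw [if_neg (by simp only [List.length_cons]; omega)]
    rfl

def pvCoreA (gw bw : List String) : Option Int × String × String × String :=
  match pvLoopA gw bw 0 with
  | some r => r
  | none =>
    if gw.length > bw.length then (some (bw.length : Int), "M", gw.getD bw.length "", "")
    else if bw.length > gw.length then (some (gw.length : Int), "U", "", bw.getD gw.length "")
    else (none, "", "", "")

lemma pvCore_eq : ∀ (gw bw : List String), pvCoreA gw bw = pvGoB 0 gw bw := by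
  intro gw
  induction gw with
  | nil =>
    intro bw
    cases bw with
    | nil => simp [pvCoreA, pvLoopA, pvGoB]
    | cons b bs =>
      simp [pvCoreA, pvLoopA, pvGoB]
  | cons g gs ih =>
    intro bw
    cases bw with
    | nil => simp [pvCoreA, pvLoopA, pvGoB]
    | cons b bs =>
      by_cases hgb : g = b
      · subst hgb
        have h0 : pvLoopA (g :: gs) (g :: bs) 0 = (pvLoopA gs bs 0).map pvShift := by
          rw [pvLoopA]
          by_cases h : 0 < min (g :: gs).length (g :: bs).length
          · rw [if_pos h]
            simp only [List.getD_cons_zero, ne_eq, not_true_eq_false, if_false]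
            exact pvLoopA_cons g g gs bs 0
          · simp at h
        have hB : pvGoB 0 (g :: gs) (g :: bs) = pvShift (pvGoB 0 gs bs) := by
          rw [pvGoB]
          simp only [ne_eq, not_true_eq_false, if_false]
          clear h0 ih
          have : ∀ (gs bs : List String) (i : Int), pvGoB (i + 1) gs bs = pvShift (pvGoB i gs bs) := by
            intro gs
            induction gs with
            | nil => intro bs i; cases bs <;> simp [pvGoB, pvShift]
            | cons x xs ih2 =>
              intro bs i
              cases bs with
              | nil => simp [pvGoB, pvShift]
              | cons y ys =>
                rw [pvGoB, pvGoB]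
                by_cases h : x = y
                · simp only [h, ne_eq, not_true_eq_false, if_false]
                  exact ih2 ys (i + 1)
                · simp [h, pvShift]
          exact this gs bs 0
        rw [hB, ← ih bs, pvCoreA, pvCoreA, h0]
        cases hL : pvLoopA gs bs 0 with
        | some r => simp
        | none =>
          simp only [Option.map_none]
          by_cases h1 : gs.length > bs.length
          · simp only [List.length_cons]
            rw [if_pos h1, if_pos (by omega)]
            simp [pvShift]
          · by_cases h2 : bs.length > gs.length
            · simp only [List.length_cons]
              rw [if_neg h1, if_neg (by omega), if_pos h2, if_pos (by omega)]
              simp [pvShift]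
            · simp only [List.length_cons]
              rw [if_neg h1, if_neg (by omega), if_neg h2, if_neg (by omega)]
              simp [pvShift]
      · have h0 : pvLoopA (g :: gs) (b :: bs) 0 = some (some 0, "R", g, b) := by
          rw [pvLoopA]
          rw [if_pos (by simp only [List.length_cons]; omega)]
          simp [hgb]
        simp [pvCoreA, h0, pvGoB, hgb]

-- ===== VERDICT (by name: the statement is the Claim_ definition above) =====
theorem find_learner_edit_spec : Claim_equal_find_learner_edit := by
  intro good bad _
  unfold Spec_find_learner_edit find_learner_edit find_learner_edit_alt
  exact pvCore_eq (PySem.Str.split₀ good) (PySem.Str.split₀ bad)
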